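-- pv_equiv track=rewrite | github.com/Simon-McIntosh/IMAS-Standard-Names | imas_standard_names/grammar/parser.py | _longest_prefix_operator_match
-- ===== SOURCE A (Python) =====
-- def _longest_prefix_operator_match(s: str, tokens: set[str]) -> str | None:
--     best: str | None = None
--     for tok in tokens:
--         marker = f"{tok}_of_"
--         if s.startswith(marker) and len(s) > len(marker):
--             if best is None or len(tok) > len(best):
--                 best = tok
--     return best
-- ===== SOURCE B (Python) =====
-- def _longest_prefix_operator_match(s: str, tokens: set[str]) -> str | None:
--     # Scan candidate split positions in s from longest prefix to shortest:
--     # the first position p with s[p:p+4] == "_of_" and s[:p] a known token wins.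
--     for p in range(len(s) - 5, -1, -1):
--         if s[p:p+4] == "_of_" and s[:p] in tokens:
--             return s[:p]
--     return None
-- ===== Notes on version B (the rewrite author's own statement) =====
-- stated objective: alternative
-- what changed: B scans the string's split positions from longest prefix down, checking '_of_' at each position and set membership of the prefix, instead of A's loop over every token with a startswith test; first hit wins.
import Mathlib
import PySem

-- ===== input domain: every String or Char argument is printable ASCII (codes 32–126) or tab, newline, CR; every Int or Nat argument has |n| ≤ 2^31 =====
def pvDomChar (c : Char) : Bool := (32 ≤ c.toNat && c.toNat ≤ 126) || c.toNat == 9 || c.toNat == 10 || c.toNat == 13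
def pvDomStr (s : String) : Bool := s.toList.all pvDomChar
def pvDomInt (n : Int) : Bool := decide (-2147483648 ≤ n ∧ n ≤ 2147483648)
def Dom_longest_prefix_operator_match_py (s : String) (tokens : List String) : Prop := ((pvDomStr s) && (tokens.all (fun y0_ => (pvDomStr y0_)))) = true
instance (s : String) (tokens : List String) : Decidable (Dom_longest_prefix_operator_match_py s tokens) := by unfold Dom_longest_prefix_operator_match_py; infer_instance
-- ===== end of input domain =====

-- B replaces A's loop over the token set (startswith per token) by a single downward scan of the
-- string's split positions with a set-membership test of the prefix; same result, first hit wins.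

-- ===== PORT A =====
-- marker = f"{tok}_of_" is built as String.ofList (tok.toList ++ "_of_".toList) (kernel-transparent append)
def longest_prefix_operator_match_py (s : String) (tokens : List String) : Option String :=
  tokens.foldl (fun best tok =>
    let marker := String.ofList (tok.toList ++ ['_','o','f','_'])
    if PySem.Str.startswith s marker && decide (PySem.Str.len s > PySem.Str.len marker) then
      match best with
      | none => some tok
      | some b => if PySem.Str.len tok > PySem.Str.len b then some tok else some b
    else best) none

-- ===== PORT B =====
-- the 'for p in range(len(s)-5, -1, -1): … return …' loop, as fuel recursion (fuel = p+1)
def lpomAltGo (s : String) (tokens : List String) : Nat → Option String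
  | 0 => none
  | p + 1 =>
    if PySem.Str.slice s (some (p : Int)) (some ((p : Int) + 4)) = "_of_"
        ∧ PySem.Str.slice s none (some (p : Int)) ∈ tokens then
      some (PySem.Str.slice s none (some (p : Int)))
    else lpomAltGo s tokens p

def longest_prefix_operator_match_py_alt (s : String) (tokens : List String) : Option String :=
  lpomAltGo s tokens ((PySem.Str.len s - 4).toNat)

-- ===== PRECONDITION & SPEC =====
def Spec_longest_prefix_operator_match_py (s : String) (tokens : List String) (out : Option String) : Prop := out = longest_prefix_operator_match_py_alt s tokens
instance (s : String) (tokens : List String) (out : Option String) : Decidable (Spec_longest_prefix_operator_match_py s tokens out) := by unfold Spec_longest_prefix_operator_match_py; infer_instance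

-- ===== CLAIM (what is proved, stated in full; the proofs are below) =====
def Claim_equal_longest_prefix_operator_match_py : Prop := ∀ (s : String) (tokens : List String), Dom_longest_prefix_operator_match_py s tokens → Spec_longest_prefix_operator_match_py s tokens (longest_prefix_operator_match_py s tokens)

-- ===== LEMMAS AND PROOFS =====

-- the marker tail '_of_' as a char list
def lpomOf4 : List Char := ['_','o','f','_']

-- 'position p splits s into a known token and "_of_" with content after'
def lpomQ (s : String) (tokens : List String) (p : Nat) : Prop :=
  p + 5 ≤ s.toList.length ∧ lpomOf4 <+: s.toList.drop p ∧ s.toList.take p ∈ tokens.map String.toList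

-- 'token t qualifies in A'
def lpomGood (s : String) (t : String) : Prop :=
  (t.toList ++ lpomOf4) <+: s.toList ∧ t.toList.length + 5 ≤ s.toList.length

lemma lpom_toList_inj : Function.Injective String.toList := fun _ _ h => String.ext_iff.mpr h

lemma lpom_append_prefix (a b l : List Char) :
    (a ++ b) <+: l ↔ a <+: l ∧ b <+: l.drop a.length := by
  constructor
  · intro h
    refine ⟨(List.prefix_append a b).trans h, ?_⟩
    obtain ⟨t, ht⟩ := h
    refine ⟨t, ?_⟩
    rw [← ht]; simp
  · rintro ⟨⟨t1, h1⟩, ⟨t2, h2⟩⟩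
    refine ⟨t2, ?_⟩
    have ha : a = l.take a.length := List.prefix_iff_eq_take.mp ⟨t1, h1⟩
    conv_rhs => rw [← List.take_append_drop a.length l, ← ha, ← h2]
    simp

-- A's per-token test, unfolded to a Prop
lemma lpom_condA_iff (s tok : String) :
    ((PySem.Str.startswith s (String.ofList (tok.toList ++ ['_','o','f','_']))
      && decide (PySem.Str.len s > PySem.Str.len (String.ofList (tok.toList ++ ['_','o','f','_'])))) = true)
    ↔ lpomGood s tok := by
  simp [PySem.Str.startswith_eq, PySem.Chars.startswith_iff, PySem.Str.len_eq, lpomGood, lpomOf4]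
  intro _
  constructor <;> intro h <;> omega

-- B's per-position test, unfolded to lpomQ (given p + 5 ≤ len)
lemma lpom_condB_iff (s : String) (tokens : List String) (p : Nat) (hp : p + 5 ≤ s.toList.length) :
    (PySem.Str.slice s (some (p : Int)) (some ((p : Int) + 4)) = "_of_"
      ∧ PySem.Str.slice s none (some (p : Int)) ∈ tokens)
    ↔ lpomQ s tokens p := by
  have hc : ((p : Int) + 4) = ((p + 4 : Nat) : Int) := by push_cast; ring
  have h1 : PySem.Str.slice s (some (p : Int)) (some ((p : Int) + 4)) = "_of_"
      ↔ lpomOf4 <+: s.toList.drop p := by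
    rw [String.ext_iff, PySem.Str.toList_slice, PySem.Chars.slice_eq_listSlice, hc,
      PySem.List.slice_natCast]
    have h4 : p + 4 - p = 4 := by omega
    rw [h4]
    rw [show ("_of_" : String).toList = lpomOf4 from by decide]
    constructor
    · intro h
      exact List.prefix_iff_eq_take.mpr (by simpa [lpomOf4] using h.symm)
    · intro h
      have := List.prefix_iff_eq_take.mp h
      simpa [lpomOf4] using this.symm
  have h2 : PySem.Str.slice s none (some (p : Int)) ∈ tokens
      ↔ s.toList.take p ∈ tokens.map String.toList := by
    constructor
    · intro h
      refine List.mem_map.mpr ⟨_, h, ?_⟩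
      rw [PySem.Str.toList_slice, PySem.Chars.slice_eq_listSlice, PySem.List.slice_to_natCast]
    · intro h
      obtain ⟨t, ht, hte⟩ := List.mem_map.mp h
      have : PySem.Str.slice s none (some (p : Int)) = t := by
        apply lpom_toList_inj
        rw [PySem.Str.toList_slice, PySem.Chars.slice_eq_listSlice, PySem.List.slice_to_natCast, hte]
      rwa [this]
  unfold lpomQ
  rw [h1, h2]
  constructor
  · rintro ⟨a, b⟩; exact ⟨hp, a, b⟩
  · rintro ⟨_, a, b⟩; exact ⟨a, b⟩

-- a qualifying position yields a qualifying token and back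
lemma lpom_good_of_Q (s : String) (tokens : List String) (p : Nat) (h : lpomQ s tokens p) :
    ∃ t ∈ tokens, t.toList = s.toList.take p ∧ lpomGood s t := by
  obtain ⟨hlen, hpre, hmem⟩ := h
  obtain ⟨t, ht, hte⟩ := List.mem_map.mp hmem
  refine ⟨t, ht, hte, ?_, ?_⟩
  · rw [lpom_append_prefix, hte]
    have hple : p ≤ s.toList.length := by omega
    constructor
    · exact List.take_prefix p s.toList
    · rwa [List.length_take, Nat.min_eq_left hple]
  · rw [hte, List.length_take, Nat.min_eq_left (by omega)]; omega

lemma lpom_Q_of_good (s : String) (tokens : List String) (t : String)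
    (ht : t ∈ tokens) (hg : lpomGood s t) : lpomQ s tokens t.toList.length := by
  obtain ⟨hpre, hlen⟩ := hg
  rw [lpom_append_prefix] at hpre
  refine ⟨hlen, hpre.2, ?_⟩
  have : s.toList.take t.toList.length = t.toList :=
    (List.prefix_iff_eq_take.mp hpre.1).symm
  rw [this]
  exact List.mem_map.mpr ⟨t, ht, rfl⟩

-- characterization of B's loop
lemma lpom_altGo_spec (s : String) (tokens : List String) :
    ∀ n, (∀ p, p < n → p + 5 ≤ s.toList.length) →
      ((lpomAltGo s tokens n = none ↔ ∀ p, p < n → ¬ lpomQ s tokens p)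
      ∧ (∀ r, lpomAltGo s tokens n = some r →
          ∃ p, p < n ∧ lpomQ s tokens p ∧ r.toList = s.toList.take p
            ∧ ∀ q, p < q → q < n → ¬ lpomQ s tokens q)) := by
  intro n
  induction n with
  | zero => intro _; exact ⟨by simp [lpomAltGo], by simp [lpomAltGo]⟩
  | succ m ih =>
    intro hb
    have hm := ih (fun p hp => hb p (by omega))
    have hcond := lpom_condB_iff s tokens m (hb m (by omega))
    constructor
    · rw [lpomAltGo]
      split_ifs with hc
      · constructor
        · intro h; simp at h
        · intro h; exact absurd (hcond.mp hc) (h m (by omega))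
      · rw [hm.1]
        constructor
        · intro h p hp
          rcases Nat.lt_succ_iff_lt_or_eq.mp hp with h' | h'
          · exact h p h'
          · subst h'; exact fun hq => hc (hcond.mpr hq)
        · intro h p hp; exact h p (by omega)
    · intro r hr
      rw [lpomAltGo] at hr
      split_ifs at hr with hc
      · refine ⟨m, by omega, hcond.mp hc, ?_, by omega⟩
        have := Option.some.inj hr
        rw [← this, PySem.Str.toList_slice, PySem.Chars.slice_eq_listSlice,
          PySem.List.slice_to_natCast]
      · obtain ⟨p, hp, hq, hre, hmax⟩ := hm.2 r hr
        refine ⟨p, by omega, hq, hre, ?_⟩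
        intro q h1 h2
        rcases Nat.lt_succ_iff_lt_or_eq.mp h2 with h' | h'
        · exact hmax q h1 h'
        · subst h'; exact fun hqq => hc (hcond.mpr hqq)

-- characterization of A's fold
lemma lpom_foldA_spec (s : String) :
    ∀ (toks : List String) (b : Option String),
      (∀ x, b = some x → lpomGood s x) →
      ((toks.foldl (fun best tok =>
          let marker := String.ofList (tok.toList ++ ['_','o','f','_'])
          if PySem.Str.startswith s marker && decide (PySem.Str.len s > PySem.Str.len marker) then
            match best with
            | none => some tok
            | some b => if PySem.Str.len tok > PySem.Str.len b then some tok else some b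
          else best) b = none ↔ b = none ∧ ∀ t ∈ toks, ¬ lpomGood s t)
      ∧ (∀ r, toks.foldl (fun best tok =>
          let marker := String.ofList (tok.toList ++ ['_','o','f','_'])
          if PySem.Str.startswith s marker && decide (PySem.Str.len s > PySem.Str.len marker) then
            match best with
            | none => some tok
            | some b => if PySem.Str.len tok > PySem.Str.len b then some tok else some b
          else best) b = some r →
          lpomGood s r ∧ (b = some r ∨ r ∈ toks)
          ∧ (∀ t ∈ toks, lpomGood s t → t.toList.length ≤ r.toList.length)
          ∧ (∀ x, b = some x → x.toList.length ≤ r.toList.length))) := by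
  intro toks
  induction toks with
  | nil =>
    intro b hbg
    refine ⟨by simp, ?_⟩
    intro r hr
    simp only [List.foldl_nil] at hr
    exact ⟨hbg r hr, Or.inl hr, by simp, fun x hx => by rw [hx] at hr; rw [Option.some.inj hr]⟩
  | cons t rest ih =>
    intro b hbg
    simp only [List.foldl_cons]
    set b' := (fun best tok =>
          let marker := String.ofList (tok.toList ++ ['_','o','f','_'])
          if PySem.Str.startswith s marker && decide (PySem.Str.len s > PySem.Str.len marker) then
            match best with
            | none => some tok
            | some b => if PySem.Str.len tok > PySem.Str.len b then some tok else some b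
          else best) b t with hb'
    have hcond := lpom_condA_iff s t
    have hb'g : ∀ x, b' = some x → lpomGood s x := by
      intro x hx
      rw [hb'] at hx
      simp only at hx
      split_ifs at hx with hc
      · cases hbv : b with
        | none =>
          rw [hbv] at hx; simp at hx
          rw [← hx]; exact hcond.mp hc
        | some bv =>
          rw [hbv] at hx; simp at hx
          split_ifs at hx with h2
          · rw [← Option.some.inj hx]; exact hcond.mp hc
          · rw [← Option.some.inj hx]; exact hbg bv hbv
      · exact hbg x hx
    have hrest := ih b' hb'g
    constructor
    · rw [hrest.1]
      constructor
      · rintro ⟨hbn, hall⟩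
        rw [hb'] at hbn
        simp only at hbn
        split_ifs at hbn with hc
        · cases hbv : b with
          | none => rw [hbv] at hbn; exact absurd hbn (by simp)
          | some bv =>
            rw [hbv] at hbn
            simp only at hbn
            split_ifs at hbn
        · refine ⟨hbn, ?_⟩
          intro u hu
          rcases List.mem_cons.mp hu with h | h
          · subst h; exact fun hg => hc (hcond.mpr hg)
          · exact hall u h
      · rintro ⟨hbn, hall⟩
        have hcf : ¬ ((PySem.Str.startswith s (String.ofList (t.toList ++ ['_','o','f','_']))
            && decide (PySem.Str.len s > PySem.Str.len (String.ofList (t.toList ++ ['_','o','f','_'])))) = true) :=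
          fun hc => (hall t (List.mem_cons_self)) (hcond.mp hc)
        refine ⟨?_, fun u hu => hall u (List.mem_cons_of_mem t hu)⟩
        rw [hb', hbn]
        simp only
        rw [if_neg hcf]
    · intro r hr
      obtain ⟨hgr, hor, hmax, hbmax⟩ := hrest.2 r hr
      refine ⟨hgr, ?_, ?_, ?_⟩
      · rcases hor with h | h
        · rw [hb'] at h
          simp only at h
          split_ifs at h with hc
          · cases hbv : b with
            | none => rw [hbv] at h; simp at h; exact Or.inr (by rw [← h]; exact List.mem_cons_self)
            | some bv =>
              rw [hbv] at h; simp at h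
              split_ifs at h with h2
              · exact Or.inr (by rw [← Option.some.inj h]; exact List.mem_cons_self)
              · exact Or.inl (congrArg some (Option.some.inj h))
          · exact Or.inl h
        · exact Or.inr (List.mem_cons_of_mem t h)
      · intro u hu hgu
        rcases List.mem_cons.mp hu with h | h
        · subst h
          -- u = t : after the step, b' dominates t's length
          have : u.toList.length ≤ (fun y => y.toList.length) u := le_refl _
          have hb'len : ∃ x, b' = some x ∧ u.toList.length ≤ x.toList.length := by
            rw [hb']
            simp only
            rw [if_pos (hcond.mpr hgu)]
            cases hbv : b with
            | none => exact ⟨u, rfl, le_refl _⟩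
            | some bv =>
              simp only
              split_ifs with h2
              · exact ⟨u, rfl, le_refl _⟩
              · refine ⟨bv, rfl, ?_⟩
                simp only [PySem.Str.len_eq] at h2
                omega
          obtain ⟨x, hx, hxl⟩ := hb'len
          exact le_trans hxl (hbmax x hx)
        · exact hmax u h hgu
      · intro x hx
        have hb'x : ∃ y, b' = some y ∧ x.toList.length ≤ y.toList.length := by
          rw [hb']
          simp only
          split_ifs with hc
          · rw [hx]
            simp only
            split_ifs with h2
            · refine ⟨t, rfl, ?_⟩
              simp only [PySem.Str.len_eq] at h2
              omega
            · exact ⟨x, rfl, le_refl _⟩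
          · exact ⟨x, hx, le_refl _⟩
        obtain ⟨y, hy, hyl⟩ := hb'x
        exact le_trans hyl (hbmax y hy)

-- good tokens are prefixes (hence determined by their length)
lemma lpom_good_take (s t : String) (h : lpomGood s t) :
    t.toList = s.toList.take t.toList.length := by
  obtain ⟨hpre, _⟩ := h
  exact List.prefix_iff_eq_take.mp ((List.prefix_append t.toList lpomOf4).trans hpre)

-- ===== VERDICT (by name: the statement is the Claim_ definition above) =====
theorem longest_prefix_operator_match_py_spec : Claim_equal_longest_prefix_operator_match_py := by
  intro s tokens _
  unfold Spec_longest_prefix_operator_match_py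
  unfold longest_prefix_operator_match_py longest_prefix_operator_match_py_alt
  have hn : ((PySem.Str.len s - 4).toNat) = s.toList.length - 4 := by
    rw [PySem.Str.len_eq]; omega
  rw [hn]
  set n := s.toList.length - 4 with hndef
  have hnb : ∀ p, p < n → p + 5 ≤ s.toList.length := by intro p hp; omega
  have hB := lpom_altGo_spec s tokens n hnb
  have hA := lpom_foldA_spec s tokens none (by simp)
  cases hAv : (tokens.foldl (fun best tok =>
      let marker := String.ofList (tok.toList ++ ['_','o','f','_'])
      if PySem.Str.startswith s marker && decide (PySem.Str.len s > PySem.Str.len marker) then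
        match best with
        | none => some tok
        | some b => if PySem.Str.len tok > PySem.Str.len b then some tok else some b
      else best) none) with
  | none =>
    have hallA := (hA.1.mp hAv).2
    cases hBv : lpomAltGo s tokens n with
    | none => rfl
    | some r =>
      obtain ⟨p, hp, hq, _, _⟩ := hB.2 r hBv
      obtain ⟨t, ht, _, hg⟩ := lpom_good_of_Q s tokens p hq
      exact absurd hg (hallA t ht)
  | some r =>
    obtain ⟨hgr, hor, hmax, _⟩ := hA.2 r hAv
    have hrmem : r ∈ tokens := by
      rcases hor with h | h
      · exact absurd h (by simp)
      · exact h
    have hQr := lpom_Q_of_good s tokens r hrmem hgr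
    have hrn : r.toList.length < n := by
      have := hgr.2; omega
    cases hBv : lpomAltGo s tokens n with
    | none => exact absurd hQr (hB.1.mp hBv r.toList.length hrn)
    | some rb =>
      obtain ⟨p, hp, hqp, hrb, hmaxB⟩ := hB.2 rb hBv
      -- p is maximal among Q-positions and r.toList.length is a Q-position
      have hle1 : r.toList.length ≤ p := by
        by_contra hlt
        exact (hmaxB r.toList.length (by omega) hrn) hQr
      -- conversely p yields a good token so p ≤ r's length
      obtain ⟨t, ht, hte, hgt⟩ := lpom_good_of_Q s tokens p hqp
      have htlen : t.toList.length = p := by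
        rw [hte, List.length_take]
        have : p + 5 ≤ s.toList.length := hqp.1
        omega
      have hle2 : p ≤ r.toList.length := by
        have := hmax t ht hgt; omega
      have hpe : p = r.toList.length := by omega
      congr 1
      apply lpom_toList_inj
      rw [hrb, hpe]
      exact lpom_good_take s r hgr
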